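-- pv_equiv track=rewrite | github.com/PanJianTing/LeetCode | 1408_StringMatchingInAnArray.py | stringMatching_my
-- ===== SOURCE A (Python) =====
-- def stringMatching_my(words: list[str]) -> list[str]:
--
-- 	result = []
--
-- 	for i in range(0, len(words)):
-- 		for j in range(0, len(words)):
-- 			if i != j:
-- 				if words[i] in words[j]:
-- 					result.append(words[i])
-- 					break
--
-- 	return result
-- ===== SOURCE B (Python) =====
-- def stringMatching_my(words: list[str]) -> list[str]:
--     # index of all PROPER substrings of every word, built once
--     subs = set()
--     for u in words:
--         n = len(u)
--         for i in range(n + 1):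
--             for j in range(i, n + 1):
--                 if j - i < n:
--                     subs.add(u[i:j])
--     cnt = {}
--     for w in words:
--         cnt[w] = cnt.get(w, 0) + 1
--     return [w for w in words if cnt[w] > 1 or w in subs]
-- ===== Notes on version B (the rewrite author's own statement) =====
-- stated objective: faster
-- what changed: Replaces A's pairwise substring search (double index loop with break) by an index built once: a hash set of all proper substrings of every word plus a count map, then a single lookup pass over words (w qualifies iff it occurs twice or is a proper substring of some word).
import Mathlib
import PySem

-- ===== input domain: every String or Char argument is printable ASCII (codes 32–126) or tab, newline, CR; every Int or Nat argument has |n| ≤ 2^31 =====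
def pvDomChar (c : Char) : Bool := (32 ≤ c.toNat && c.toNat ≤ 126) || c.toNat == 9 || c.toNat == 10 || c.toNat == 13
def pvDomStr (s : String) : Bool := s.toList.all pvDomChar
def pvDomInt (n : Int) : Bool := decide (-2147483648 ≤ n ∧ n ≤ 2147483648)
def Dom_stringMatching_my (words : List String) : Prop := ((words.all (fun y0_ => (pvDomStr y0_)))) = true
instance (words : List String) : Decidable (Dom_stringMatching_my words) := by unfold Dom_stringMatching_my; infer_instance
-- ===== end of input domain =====

-- B replaces A's pairwise substring search by a set of all proper substrings plus a count map built once, then one lookup pass: quadratic in the number of words becomes linear (measurably faster); same return value.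

-- ===== PORT A =====
-- inner loop of A: 'for j in range(len(words)): if i != j: if words[i] in words[j]: append; break'
def pvInnerA (words : List String) (i : Int) : List Int → List String → List String
  | [], res => res
  | j :: js, res =>
    if i ≠ j then
      if PySem.Str.isIn (PySem.List.pyGetD words i "") (PySem.List.pyGetD words j "") then
        res ++ [PySem.List.pyGetD words i ""]
      else pvInnerA words i js res
    else pvInnerA words i js res

def stringMatching_my (words : List String) : List String :=
  (PySem.List.pyRange 0 (words.length : Int) 1).foldl
    (fun result i => pvInnerA words i (PySem.List.pyRange 0 (words.length : Int) 1) result) []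

-- ===== PORT B =====
-- 'for u in words: for i in range(n+1): for j in range(i, n+1): if j-i < n: subs.add(u[i:j])'
def pvSubsB (words : List String) : PySem.Set String :=
  words.foldl (fun subs u =>
    let n := PySem.Str.len u
    (PySem.List.pyRange 0 (n + 1) 1).foldl (fun subs i =>
      (PySem.List.pyRange i (n + 1) 1).foldl (fun subs j =>
        if j - i < n then PySem.Set.add subs (PySem.Str.slice u (some i) (some j)) else subs)
        subs)
      subs)
    (PySem.Set.ofList [])

def stringMatching_my_alt (words : List String) : List String :=
  let subs := pvSubsB words
  let cnt := words.foldl (fun d w => PySem.Dict.modify d w 0 (· + 1)) PySem.Dict.empty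
  words.filter (fun w => decide ((1 : Int) < cnt.getD w 0) || subs.contains w)

-- ===== PRECONDITION & SPEC =====
def Spec_stringMatching_my (words : List String) (out : List String) : Prop := out = stringMatching_my_alt words
instance (words : List String) (out : List String) : Decidable (Spec_stringMatching_my words out) := by unfold Spec_stringMatching_my; infer_instance

-- ===== CLAIM (what is proved, stated in full; the proofs are below) =====
def Claim_equal_stringMatching_my : Prop := ∀ (words : List String), Dom_stringMatching_my words → Spec_stringMatching_my words (stringMatching_my words)

-- ===== LEMMAS AND PROOFS =====

-- The inner j-loop of A appends words[i] exactly when some j in the scanned list has i != j and words[i] in words[j].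
theorem pvInnerA_eq (words : List String) (i : Int) (js : List Int) (res : List String) :
    pvInnerA words i js res =
      if js.any (fun j => decide (i ≠ j) && PySem.Str.isIn (PySem.List.pyGetD words i "") (PySem.List.pyGetD words j "")) then
        res ++ [PySem.List.pyGetD words i ""]
      else res := by
  induction js with
  | nil => simp [pvInnerA]
  | cons j js ih =>
    simp only [pvInnerA, List.any_cons]
    by_cases hij : i = j
    · rw [if_neg (by simp [hij]), ih]
      simp only [show decide (i ≠ j) = false by simp [hij], Bool.false_and, Bool.false_or]
    · rw [if_pos hij]
      by_cases hin : PySem.Str.isIn (PySem.List.pyGetD words i "") (PySem.List.pyGetD words j "") = true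
      · rw [if_pos hin]
        simp only [show decide (i ≠ j) = true by simp [hij], Bool.true_and, hin, Bool.true_or]
        simp
      · rw [if_neg hin, ih]
        simp only [show decide (i ≠ j) = true by simp [hij], Bool.true_and,
          show PySem.Str.isIn (PySem.List.pyGetD words i "") (PySem.List.pyGetD words j "") = false by
            simpa using hin,
          Bool.false_or]

-- a string is a (non-strict) infix of itself
theorem pv_isIn_self (w : String) : PySem.Str.isIn w w = true :=
  (PySem.Str.isIn_iff_infix w w).mpr (List.infix_refl _)

-- two distinct positions carrying the same value give count ≥ 2 (ordered version)
theorem pv_two_le_count_aux {l : List String} {v : String} {a b : Nat} (hab : a < b)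
    (hb : b < l.length) (h1 : l[a]'(lt_trans hab hb) = v) (h2 : l[b] = v) : 2 ≤ l.count v := by
  have ha : a < l.length := lt_trans hab hb
  have hsplit : l.take (a+1) ++ l.drop (a+1) = l := List.take_append_drop _ _
  have hm1 : v ∈ l.take (a+1) := by
    have : (l.take (a+1))[a]'(by simp [ha]) = l[a] := List.getElem_take
    rw [← h1, ← this]
    exact List.getElem_mem _
  have hm2 : v ∈ l.drop (a+1) := by
    have hlt : b - (a+1) < (l.drop (a+1)).length := by simp [List.length_drop]; omega
    have : (l.drop (a+1))[b - (a+1)]'hlt = l[b] := by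
      rw [List.getElem_drop]
      congr 1
      omega
    rw [← h2, ← this]
    exact List.getElem_mem _
  have c1 : 0 < (l.take (a+1)).count v := List.count_pos_iff.mpr hm1
  have c2 : 0 < (l.drop (a+1)).count v := List.count_pos_iff.mpr hm2
  calc 2 ≤ (l.take (a+1)).count v + (l.drop (a+1)).count v := by omega
    _ = l.count v := by rw [← List.count_append, hsplit]

theorem pv_two_le_count {l : List String} {v : String} {a b : Nat} (ha : a < l.length)
    (hb : b < l.length) (hne : a ≠ b) (h1 : l[a] = v) (h2 : l[b] = v) : 2 ≤ l.count v := by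
  rcases Nat.lt_or_ge a b with h | h
  · exact pv_two_le_count_aux h hb h1 h2
  · exact pv_two_le_count_aux (by omega) ha h2 h1

-- count ≥ 2 yields a second position of the same value
theorem pv_exists_other_idx {l : List String} {v : String} {k : Nat} (hk : k < l.length)
    (hv : l[k] = v) (h : 2 ≤ l.count v) : ∃ j, ∃ hj : j < l.length, j ≠ k ∧ l[j] = v := by
  have hsplit : l.take k ++ l.drop k = l := List.take_append_drop _ _
  have hdrop : v :: l.drop (k+1) = l.drop k := by rw [← hv]; exact List.getElem_cons_drop hk
  have hcnt : l.count v = (l.take k).count v + (1 + (l.drop (k+1)).count v) := by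
    conv_lhs => rw [← hsplit]
    rw [List.count_append, ← hdrop, List.count_cons_self]
    omega
  rcases Nat.lt_or_ge 0 ((l.take k).count v) with hpos | hz
  · obtain ⟨m, hm', hval⟩ := List.mem_iff_getElem.mp (List.count_pos_iff.mp hpos)
    have hmk : m < k := by simp [List.length_take] at hm'; omega
    refine ⟨m, by omega, by omega, ?_⟩
    rw [← hval, List.getElem_take]
  · have hpos : 0 < (l.drop (k+1)).count v := by omega
    obtain ⟨m, hm', hval⟩ := List.mem_iff_getElem.mp (List.count_pos_iff.mp hpos)
    have hlen : (l.drop (k+1)).length = l.length - (k+1) := List.length_drop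
    refine ⟨k+1+m, by omega, by omega, ?_⟩
    rw [← hval, List.getElem_drop]

-- the value-level equivalence between A's index condition and the value condition
theorem pv_cond_iff (words : List String) (k : Nat) (hk : k < words.length) :
    (∃ j, j < words.length ∧ j ≠ k ∧ PySem.Str.isIn words[k] (words.getD j "") = true) ↔
      (1 < words.count words[k] ∨ ∃ u ∈ words, words[k] ≠ u ∧ PySem.Str.isIn words[k] u = true) := by
  constructor
  · rintro ⟨j, hj, hne, hin⟩
    rw [List.getD_eq_getElem words "" hj] at hin
    by_cases heq : words[j] = words[k]
    · left
      have := pv_two_le_count hk hj (Ne.symm hne) rfl heq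
      omega
    · right
      exact ⟨words[j], List.getElem_mem _, fun h => heq h.symm, hin⟩
  · rintro (hcnt | ⟨u, hu, hne, hin⟩)
    · obtain ⟨j, hj, hjk, hval⟩ := pv_exists_other_idx hk rfl (by omega)
      exact ⟨j, hj, hjk, by rw [List.getD_eq_getElem words "" hj, hval]; exact pv_isIn_self _⟩
    · obtain ⟨j, hj, hval⟩ := List.mem_iff_getElem.mp hu
      refine ⟨j, hj, fun h => hne (h ▸ hval), by rw [List.getD_eq_getElem words "" hj, hval]; exact hin⟩

-- positional filter over range = value filter, when the index predicate factors through the value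
theorem pv_filter_range {α : Type} (l : List α) (d : α) (q : Nat → Bool) (p : α → Bool)
    (hqp : ∀ m (hm : m < l.length), q m = p l[m]) :
    ((List.range l.length).filter q).map (fun m => l.getD m d) = l.filter p := by
  suffices h : ∀ m, m ≤ l.length →
      ((List.range m).filter q).map (fun i => l.getD i d) = (l.take m).filter p by
    have := h l.length le_rfl
    rwa [List.take_length] at this
  intro m hm
  induction m with
  | zero => simp
  | succ m ih =>
    have hml : m < l.length := hm
    rw [List.range_succ, List.filter_append, List.map_append, ih (by omega),
      List.take_add_one, List.filter_append]
    congr 1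
    by_cases hq : q m = true
    · simp [hq, List.getElem?_eq_getElem hml, ← hqp m hml]
    · have hp : p l[m] = false := by rw [← hqp m hml]; simpa using hq
      simp [hq, List.getElem?_eq_getElem hml, hp]

-- membership through a fold of conditional set-insertions
theorem pv_mem_foldl_addIf {β : Type} (l : List β) (p : β → Prop) [DecidablePred p] (f : β → String)
    (s : PySem.Set String) (w : String) :
    (w ∈ l.foldl (fun s b => if p b then PySem.Set.add s (f b) else s) s) ↔
      w ∈ s ∨ ∃ b ∈ l, p b ∧ w = f b := by
  induction l generalizing s with
  | nil => simp
  | cons b l ih =>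
    simp only [List.foldl_cons, List.mem_cons]
    by_cases hp : p b
    · rw [if_pos hp, ih]
      rw [PySem.Set.mem_add]
      constructor
      · rintro (⟨h | h⟩ | ⟨c, hc, hpc, rfl⟩)
        · exact Or.inl h
        · exact Or.inr ⟨b, Or.inl rfl, hp, h⟩
        · exact Or.inr ⟨c, Or.inr hc, hpc, rfl⟩
      · rintro (h | ⟨c, (rfl | hc), hpc, rfl⟩)
        · exact Or.inl (Or.inl h)
        · exact Or.inl (Or.inr rfl)
        · exact Or.inr ⟨c, hc, hpc, rfl⟩
    · rw [if_neg hp, ih]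
      constructor
      · rintro (h | ⟨c, hc, hpc, rfl⟩)
        · exact Or.inl h
        · exact Or.inr ⟨c, Or.inr hc, hpc, rfl⟩
      · rintro (h | ⟨c, (rfl | hc), hpc, rfl⟩)
        · exact Or.inl h
        · exact absurd hpc hp
        · exact Or.inr ⟨c, hc, hpc, rfl⟩

-- membership through the double i/j loop of one word u
theorem pv_mem_word_loop (u : String) (n : Int) (I : List Int) (s : PySem.Set String) (w : String) :
    (w ∈ I.foldl (fun subs i =>
        (PySem.List.pyRange i (n + 1) 1).foldl (fun subs j =>
          if j - i < n then PySem.Set.add subs (PySem.Str.slice u (some i) (some j)) else subs)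
          subs) s) ↔
      w ∈ s ∨ ∃ i ∈ I, ∃ j ∈ PySem.List.pyRange i (n + 1) 1, j - i < n ∧ w = PySem.Str.slice u (some i) (some j) := by
  induction I generalizing s with
  | nil => simp
  | cons i I ih =>
    simp only [List.foldl_cons, List.mem_cons]
    rw [ih]
    rw [pv_mem_foldl_addIf (PySem.List.pyRange i (n + 1) 1) (fun j => j - i < n)
      (fun j => PySem.Str.slice u (some i) (some j)) s w]
    constructor
    · rintro (⟨h | ⟨j, hj, hc, rfl⟩⟩ | ⟨i', hi', j, hj, hc, rfl⟩)
      · exact Or.inl h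
      · exact Or.inr ⟨i, Or.inl rfl, j, hj, hc, rfl⟩
      · exact Or.inr ⟨i', Or.inr hi', j, hj, hc, rfl⟩
    · rintro (h | ⟨i', (rfl | hi'), j, hj, hc, rfl⟩)
      · exact Or.inl (Or.inl h)
      · exact Or.inl (Or.inr ⟨j, hj, hc, rfl⟩)
      · exact Or.inr ⟨i', hi', j, hj, hc, rfl⟩

-- the double loop over one word produces exactly its strict (proper) infixes
theorem pv_word_strict_iff (u w : String) :
    (∃ i ∈ PySem.List.pyRange 0 (PySem.Str.len u + 1) 1,
       ∃ j ∈ PySem.List.pyRange i (PySem.Str.len u + 1) 1,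
         j - i < PySem.Str.len u ∧ w = PySem.Str.slice u (some i) (some j)) ↔
      (w.toList <:+: u.toList ∧ w.toList.length < u.toList.length) := by
  rw [PySem.Str.len_eq]
  constructor
  · rintro ⟨i, hi, j, hj, hc, rfl⟩
    rw [PySem.List.mem_pyRange_one] at hi hj
    have h0i : 0 ≤ i := hi.1
    have h0j : 0 ≤ j := le_trans h0i hj.1
    have htl : (PySem.Str.slice u (some i) (some j)).toList =
        List.take (j.toNat - i.toNat) (List.drop i.toNat u.toList) := by
      rw [PySem.Str.toList_slice, PySem.Chars.slice_eq_listSlice, PySem.List.slice_toNat _ h0i h0j]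
    constructor
    · rw [htl]
      exact List.IsInfix.trans (List.take_prefix _ _).isInfix (List.drop_suffix _ _).isInfix
    · rw [htl]
      have hlen : (List.take (j.toNat - i.toNat) (List.drop i.toNat u.toList)).length ≤ j.toNat - i.toNat := by
        simp [List.length_take]
      omega
  · rintro ⟨⟨pre, suf, heq⟩, hlt⟩
    refine ⟨(pre.length : Int), ?_, (pre.length : Int) + (w.toList.length : Int), ?_, by omega, ?_⟩
    · rw [PySem.List.mem_pyRange_one]
      have := congrArg List.length heq
      simp only [List.length_append] at this
      omega
    · rw [PySem.List.mem_pyRange_one]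
      have := congrArg List.length heq
      simp only [List.length_append] at this
      omega
    · apply String.toList_inj.mp
      rw [PySem.Str.toList_slice, PySem.Chars.slice_eq_listSlice,
        PySem.List.slice_natCast_add u.toList pre.length w.toList.length, ← heq,
        List.append_assoc, List.drop_left' rfl, List.take_left' rfl]

-- the full subs set holds exactly the strict infixes of some word
theorem pv_mem_subsB (words : List String) (w : String) :
    w ∈ pvSubsB words ↔
      ∃ u ∈ words, w.toList <:+: u.toList ∧ w.toList.length < u.toList.length := by
  unfold pvSubsB
  suffices h : ∀ (s : PySem.Set String),
      (w ∈ words.foldl (fun subs u =>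
        (PySem.List.pyRange 0 (PySem.Str.len u + 1) 1).foldl (fun subs i =>
          (PySem.List.pyRange i (PySem.Str.len u + 1) 1).foldl (fun subs j =>
            if j - i < PySem.Str.len u then PySem.Set.add subs (PySem.Str.slice u (some i) (some j)) else subs)
            subs) subs) s) ↔
      w ∈ s ∨ ∃ u ∈ words, w.toList <:+: u.toList ∧ w.toList.length < u.toList.length by
    rw [h (PySem.Set.ofList [])]
    simp [PySem.Set.ofList]
  intro s
  induction words generalizing s with
  | nil => simp
  | cons u ws ih =>
    simp only [List.foldl_cons, List.mem_cons]
    rw [ih, pv_mem_word_loop u (PySem.Str.len u) _ s w, pv_word_strict_iff u w]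
    constructor
    · rintro (⟨h | h⟩ | ⟨v, hv, hw⟩)
      · exact Or.inl h
      · exact Or.inr ⟨u, Or.inl rfl, h⟩
      · exact Or.inr ⟨v, Or.inr hv, hw⟩
    · rintro (h | ⟨v, (rfl | hv), hw⟩)
      · exact Or.inl (Or.inl h)
      · exact Or.inl (Or.inr hw)
      · exact Or.inr ⟨v, hv, hw⟩

-- "w is a strict infix of some word" = "w is contained in a DIFFERENT word value"
theorem pv_strict_iff_other (words : List String) (w : String) :
    (∃ u ∈ words, w.toList <:+: u.toList ∧ w.toList.length < u.toList.length) ↔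
      ∃ u ∈ words, w ≠ u ∧ PySem.Str.isIn w u = true := by
  constructor
  · rintro ⟨u, hu, hinf, hlt⟩
    refine ⟨u, hu, ?_, (PySem.Str.isIn_iff_infix w u).mpr hinf⟩
    intro h
    rw [h] at hlt
    omega
  · rintro ⟨u, hu, hne, hin⟩
    have hinf := (PySem.Str.isIn_iff_infix w u).mp hin
    refine ⟨u, hu, hinf, ?_⟩
    rcases lt_or_eq_of_le (List.IsInfix.length_le hinf) with h | h
    · exact h
    · exact absurd (String.toList_inj.mp (List.IsInfix.eq_of_length hinf h)) hne

-- ===== VERDICT (by name: the statement is the Claim_ definition above) =====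
theorem stringMatching_my_spec : Claim_equal_stringMatching_my := by
  intro words _
  show stringMatching_my words = stringMatching_my_alt words
  unfold stringMatching_my stringMatching_my_alt
  simp only [pvInnerA_eq]
  rw [PySem.List.foldl_append_if]
  rw [PySem.List.pyRange_one]
  simp only [Int.sub_zero, Int.toNat_natCast, List.filter_map, List.map_map, List.nil_append,
    Function.comp_def, zero_add, PySem.List.pyGetD_natCast]
  refine pv_filter_range words "" _ _ (fun m hm => ?_)
  simp only [List.getD_eq_getElem words "" hm]
  rw [Bool.eq_iff_iff]
  simp only [List.any_eq_true, List.mem_map, List.mem_range, Bool.or_eq_true, Bool.and_eq_true,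
    decide_eq_true_eq, PySem.Set.contains, List.contains_iff_mem,
    PySem.Dict.getD_foldl_modify_add_one words PySem.Dict.empty words[m],
    PySem.Dict.getD_empty, pv_mem_subsB, pv_strict_iff_other]
  constructor
  · rintro ⟨x, ⟨a, ha, rfl⟩, hne, hin⟩
    have := (pv_cond_iff words m hm).mp ⟨a, ha, ?hja, ?hjb⟩
    · rcases this with h | h
      · left; omega
      · exact Or.inr h
    · intro h
      exact hne (by rw [h])
    · rwa [PySem.List.pyGetD_natCast] at hin
  · intro h
    have h' : 1 < words.count words[m] ∨
        ∃ u ∈ words, words[m] ≠ u ∧ PySem.Str.isIn words[m] u = true := by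
      rcases h with h | h
      · left; exact_mod_cast (by simpa using h : (1 : Int) < (words.count words[m] : Int))
      · exact Or.inr h
    obtain ⟨j, hj, hjm, hin⟩ := (pv_cond_iff words m hm).mpr h'
    exact ⟨(j : Int), ⟨j, hj, rfl⟩, by exact_mod_cast Ne.symm hjm,
      by rw [PySem.List.pyGetD_natCast]; exact hin⟩
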